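-- pv_equiv track=rewrite | github.com/Azure/AzureDatabricksBestPractices | base/summit/Machine-Learning-in-Production-1.0.0/Python/Solutions/Labs/07-Lab.py | postprocess_result
-- ===== SOURCE A (Python) =====
-- def postprocess_result(results):
--     '''return post-processed results
--     High: predicted price >= 120
--     Medium: predicted price < 120 and >= 70
--     Low: predicted price < 70'''
--     output = []
--     for result in results:
--       if result >= 120:
--         output.append("High")
--       elif result >= 70:
--         output.append("Medium")
--       else:
--         output.append("Low")
--     return output
-- ===== SOURCE B (Python) =====
-- def postprocess_result(results):
--     # paint-over: everything starts "Low"; each (threshold, label) sweep overwrites qualifying slots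
--     output = ["Low"] * len(results)
--     for threshold, label in ((70, "Medium"), (120, "High")):
--         for i, result in enumerate(results):
--             if result >= threshold:
--                 output[i] = label
--     return output
-- ===== Notes on version B (the rewrite author's own statement) =====
-- stated objective: alternative
-- what changed: Replaced the single pass with a per-element three-way if/elif branch appending to an accumulator by a paint-over scheme: a pre-filled all-'Low' output array is overwritten in staged sweeps driven by a (threshold,label) boundary table, one sweep per threshold.
import Mathlib
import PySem

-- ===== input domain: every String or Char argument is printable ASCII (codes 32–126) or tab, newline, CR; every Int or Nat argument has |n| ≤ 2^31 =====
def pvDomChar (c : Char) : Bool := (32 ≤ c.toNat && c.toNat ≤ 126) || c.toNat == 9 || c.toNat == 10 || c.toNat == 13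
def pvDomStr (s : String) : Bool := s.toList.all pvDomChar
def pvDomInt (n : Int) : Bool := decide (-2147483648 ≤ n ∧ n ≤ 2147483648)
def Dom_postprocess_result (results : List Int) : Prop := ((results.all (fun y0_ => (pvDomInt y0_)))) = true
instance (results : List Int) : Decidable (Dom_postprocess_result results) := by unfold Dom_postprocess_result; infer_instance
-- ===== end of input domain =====

-- B replaces A's per-element three-way branch + accumulator by staged paint-over sweeps over a (threshold,label) table (alternative decomposition, same cost).


-- ===== PORT A =====
def postprocess_result (results : List Int) : List String :=
  results.foldl (fun output result =>
    if result ≥ 120 then output ++ ["High"]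
    else if result ≥ 70 then output ++ ["Medium"]
    else output ++ ["Low"]) []

-- ===== PORT B =====
-- one sweep: 'for i, result in enumerate(results): if result >= threshold: output[i] = label'
def pvSweep (results : List Int) (threshold : Int) (label : String) (output : List String) : List String :=
  (PySem.List.enumerate results).foldl
    (fun out p => if p.2 ≥ threshold then PySem.List.pySetD out p.1 label else out) output

def postprocess_result_alt (results : List Int) : List String :=
  [((70 : Int), "Medium"), ((120 : Int), "High")].foldl
    (fun output tl => pvSweep results tl.1 tl.2 output)
    (List.replicate results.length "Low")

-- ===== PRECONDITION & SPEC =====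
def Spec_postprocess_result (results : List Int) (out : List String) : Prop := out = postprocess_result_alt results
instance (results : List Int) (out : List String) : Decidable (Spec_postprocess_result results out) := by unfold Spec_postprocess_result; infer_instance

-- ===== CLAIM (what is proved, stated in full; the proofs are below) =====
def Claim_equal_postprocess_result : Prop := ∀ (results : List Int), Dom_postprocess_result results → Spec_postprocess_result results (postprocess_result results)

-- ===== LEMMAS AND PROOFS =====

-- A's fold with appends builds the map of the three-way branch
theorem pv_A_map (results : List Int) (acc : List String) :
    results.foldl (fun output result =>
      if result ≥ 120 then output ++ ["High"]
      else if result ≥ 70 then output ++ ["Medium"]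
      else output ++ ["Low"]) acc
    = acc ++ results.map (fun r => if r ≥ 120 then "High" else if r ≥ 70 then "Medium" else "Low") := by
  induction results generalizing acc with
  | nil => simp
  | cons r rs ih =>
    simp only [List.foldl, List.map]
    rw [ih]
    split_ifs <;> simp

-- a sweep over 'pre ++ rs.map f' (enumeration starting at pre.length) overwrites exactly the qualifying map cells
theorem pv_sweep_map (t : Int) (lab : String) (f : Int → String) :
    ∀ (rs : List Int) (pre : List String),
      (PySem.List.enumerate rs (pre.length : Int)).foldl
        (fun out p => if p.2 ≥ t then PySem.List.pySetD out p.1 lab else out) (pre ++ rs.map f)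
      = pre ++ rs.map (fun r => if r ≥ t then lab else f r) := by
  intro rs
  induction rs with
  | nil => intro pre; simp [PySem.List.enumerate_nil]
  | cons r rs ih =>
    intro pre
    rw [PySem.List.enumerate_cons]
    simp only [List.map, List.foldl]
    by_cases h : r ≥ t
    · have hset : PySem.List.pySetD (pre ++ f r :: rs.map f) ((pre.length : Nat) : Int) lab
          = pre ++ lab :: rs.map f := by
        rw [PySem.List.pySetD_natCast]
        simp
      simp only [h, if_true, hset]
      have := ih (pre ++ [lab])
      simp only [List.length_append, List.length_cons, List.length_nil] at this
      push_cast at this ⊢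
      simpa using this
    · simp only [h, if_false]
      have := ih (pre ++ [f r])
      simp only [List.length_append, List.length_cons, List.length_nil] at this
      push_cast at this ⊢
      simpa using this

theorem pv_sweep_map0 (t : Int) (lab : String) (f : Int → String) (rs : List Int) :
    pvSweep rs t lab (rs.map f) = rs.map (fun r => if r ≥ t then lab else f r) := by
  have := pv_sweep_map t lab f rs []
  simpa [pvSweep] using this

-- ===== VERDICT (by name: the statement is the Claim_ definition above) =====
theorem postprocess_result_spec : Claim_equal_postprocess_result := by
  intro results _
  unfold Spec_postprocess_result postprocess_result postprocess_result_alt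
  rw [pv_A_map]
  have hrep : List.replicate results.length "Low" = results.map (fun _ => "Low") := by
    simp
  simp only [List.foldl, hrep, pv_sweep_map0]
  simp only [List.nil_append]
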